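-- pv_equiv track=rewrite | github.com/r-reji/advent-of-code | aoc22/day1/day1.py | max_elf
-- ===== SOURCE A (Python) =====
-- def max_elf(calories):
--     '''
--     sub-array w/ max sum and w/o zero elements
--     '''
--     max_cal, curr_sum = 0, 0
--     for l in range(len(calories)):
--         if calories[l] == 0:
--             max_cal = max(max_cal, curr_sum)
--             curr_sum = 0
--         else:
--             curr_sum += calories[l]
--     return max(max_cal, curr_sum)
-- ===== SOURCE B (Python) =====
-- def max_elf(calories):
--     # group-then-reduce: split into zero-delimited segments, then take the max segment sum (floored at 0)
--     segments = []
--     cur = []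
--     for x in calories:
--         if x == 0:
--             segments.append(cur)
--             cur = []
--         else:
--             cur.append(x)
--     segments.append(cur)
--     return max([0] + [sum(s) for s in segments])
-- ===== Notes on version B (the rewrite author's own statement) =====
-- stated objective: idiomatic
-- what changed: B first splits the list into zero-delimited segments and then reduces with max over segment sums (floored at 0), replacing A's single index loop with a running accumulator and reset.
import Mathlib
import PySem

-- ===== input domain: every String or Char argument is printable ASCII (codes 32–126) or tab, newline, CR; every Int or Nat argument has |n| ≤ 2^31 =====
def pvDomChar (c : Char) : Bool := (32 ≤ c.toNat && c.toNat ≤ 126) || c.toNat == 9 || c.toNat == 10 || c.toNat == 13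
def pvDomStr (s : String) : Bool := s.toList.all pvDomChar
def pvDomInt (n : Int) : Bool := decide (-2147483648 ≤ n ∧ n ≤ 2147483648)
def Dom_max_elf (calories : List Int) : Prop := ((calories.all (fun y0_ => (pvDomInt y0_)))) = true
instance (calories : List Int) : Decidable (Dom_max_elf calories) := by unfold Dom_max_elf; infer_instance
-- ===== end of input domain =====

-- B splits into zero-delimited segments and reduces with max over segment sums; A keeps one running accumulator.

-- ===== PORT A =====
-- for l in range(len(calories)): running (max_cal, curr_sum) with reset at zeros
def max_elf (calories : List Int) : Int :=
  let st := (PySem.List.pyRange 0 calories.length 1).foldl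
    (fun (st : Int × Int) l =>
      -- calories[l]: index always in range here, so pyGetD is exact
      if PySem.List.pyGetD calories l 0 = 0 then (max st.1 st.2, 0)
      else (st.1, st.2 + PySem.List.pyGetD calories l 0))
    (0, 0)
  max st.1 st.2

-- ===== PORT B =====
-- build the list of segments (flush on zeros, plus the trailing segment), then max over [0] ++ sums
def max_elf_alt (calories : List Int) : Int :=
  let p := calories.foldl
    (fun (st : List (List Int) × List Int) x =>
      if x = 0 then (st.1 ++ [st.2], []) else (st.1, st.2 ++ [x]))
    ([], [])
  let segments := p.1 ++ [p.2]
  -- max([0] + [sum(s) for s in segments]) : fold max over the sums starting from 0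
  (segments.map (fun s => s.sum)).foldl max 0

-- ===== PRECONDITION & SPEC =====
def Spec_max_elf (calories : List Int) (out : Int) : Prop := out = max_elf_alt calories
instance (calories : List Int) (out : Int) : Decidable (Spec_max_elf calories out) := by unfold Spec_max_elf; infer_instance

-- ===== CLAIM (what is proved, stated in full; the proofs are below) =====
def Claim_equal_max_elf : Prop := ∀ (calories : List Int), Dom_max_elf calories → Spec_max_elf calories (max_elf calories)

-- ===== LEMMAS AND PROOFS =====

theorem pv_loop_rel (xs : List Int) :
    ∀ (m c : Int) (segs : List (List Int)) (cur : List Int),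
    m = (segs.map (fun s => s.sum)).foldl max 0 → c = cur.sum →
    (let st := xs.foldl (fun (st : Int × Int) v =>
        if v = 0 then (max st.1 st.2, 0) else (st.1, st.2 + v)) (m, c)
     max st.1 st.2)
    = (let p := xs.foldl (fun (st : List (List Int) × List Int) x =>
          if x = 0 then (st.1 ++ [st.2], []) else (st.1, st.2 ++ [x])) (segs, cur)
       ((p.1 ++ [p.2]).map (fun s => s.sum)).foldl max 0) := by
  induction xs with
  | nil =>
    intro m c segs cur hm hc
    simp [hm, hc, List.foldl_append]
  | cons x xs ih =>
    intro m c segs cur hm hc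
    by_cases hx : x = 0
    · simpa [hx] using ih (max m c) 0 (segs ++ [cur]) []
        (by simp [hm, hc, List.foldl_append]) (by simp)
    · simpa [hx] using ih m (c + x) segs (cur ++ [x]) hm (by simp [hc])

-- ===== VERDICT (by name: the statement is the Claim_ definition above) =====
theorem max_elf_spec : Claim_equal_max_elf := by
  intro calories _
  unfold Spec_max_elf max_elf max_elf_alt
  rw [PySem.List.foldl_pyRange_zero_pyGetD' calories 0
    (fun st v => if v = 0 then (max st.1 st.2, 0) else (st.1, st.2 + v)) (0, 0)]
  simpa using pv_loop_rel calories 0 0 [] [] (by simp) (by simp)
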